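-- pv_equiv track=rewrite | github.com/Stargazer131/String-Matching-Algorithms | left_to_right/shift_or.py | build_Sc_table
-- ===== SOURCE A (Python) =====
-- def build_Sc_table(x: str, y: str):
--     alphabet = set(x+y)
--     Sc = {}
--     for c in alphabet:
--         binary_string = ''
--         for char in x:
--             if char == c:
--                 binary_string += '0'
--             else:
--                 binary_string += '1'
--
--         # convert from binary string to int -> only int can use bitwise operation
--         Sc[c] = int(binary_string, 2)
--
--     return Sc
-- ===== SOURCE B (Python) =====
-- def build_Sc_table(x: str, y: str):
--     n = len(x)
--     rows = {c: bytearray(b'1' * n) for c in dict.fromkeys(x + y)}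
--     for i, ch in enumerate(x):
--         rows[ch][i] = 0x30          # ASCII '0'
--     return {c: int(bytes(row), 2) for c, row in rows.items()}
-- ===== Notes on version B (the rewrite author's own statement) =====
-- stated objective: faster
-- what changed: Instead of rebuilding and parsing a fresh |x|-character binary string for every alphabet character (a Python-level loop per character), B initialises one all-ones byte row per distinct character and clears the matching position in a single pass over x, then parses each row once.
import Mathlib
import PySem

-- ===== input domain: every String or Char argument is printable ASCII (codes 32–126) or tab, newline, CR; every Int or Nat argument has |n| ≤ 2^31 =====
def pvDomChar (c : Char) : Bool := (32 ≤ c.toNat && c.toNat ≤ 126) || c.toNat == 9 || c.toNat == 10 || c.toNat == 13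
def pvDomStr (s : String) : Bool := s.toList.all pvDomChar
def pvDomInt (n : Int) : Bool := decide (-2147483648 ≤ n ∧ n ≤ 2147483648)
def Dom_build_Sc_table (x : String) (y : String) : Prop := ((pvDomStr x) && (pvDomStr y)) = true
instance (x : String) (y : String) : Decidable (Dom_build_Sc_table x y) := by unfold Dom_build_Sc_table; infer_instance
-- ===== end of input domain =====

-- B replaces A's per-alphabet-character rebuild of an |x|-length binary string by one pass over x
-- clearing the matching position in a per-character all-ones row (objective: faster, measured).


-- ===== PORT A =====
-- int(s, 2), hand-ported: exact on the strings these programs feed it (only digits '0'/'1');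
-- none exactly where Python raises ValueError (the empty string).
def pvIntBase2? (bs : List Char) : Option Int :=
  if bs = [] then none
  else some (bs.foldl (fun a ch => a * 2 + (if ch = '0' then 0 else 1)) 0)

def build_Sc_table (x : String) (y : String) : List (String × Int) :=
  let alphabet : PySem.Set Char := PySem.Set.ofList (x.toList ++ y.toList)
  let Sc : PySem.Dict String Int :=
    alphabet.foldl
      (fun Sc c =>
        let binary_string : List Char :=
          x.toList.foldl (fun bs char => bs ++ [if char = c then '0' else '1']) []
        match pvIntBase2? binary_string with
        | some v => Sc.insert (String.singleton c) v
        | none => Sc)   -- unreachable under Pre_ (Python raises here)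
      PySem.Dict.empty
  Sc.items

-- ===== PORT B =====
-- Source B's bytearrays of ASCII '1'/'0' bytes are ported as List Char rows; rows[ch][i] = 0x30 is
-- the in-place index assignment PySem.List.pySetD (i is always in range: 0 ≤ i < len(x)).
def build_Sc_table_alt (x : String) (y : String) : List (String × Int) :=
  let n : Nat := x.toList.length
  let keys : List Char := PySem.List.dedup (x.toList ++ y.toList)
  let rows0 : PySem.Dict Char (List Char) :=
    keys.foldl (fun d c => d.insert c (List.replicate n '1')) PySem.Dict.empty
  let rows : PySem.Dict Char (List Char) :=
    (PySem.List.enumerate x.toList).foldl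
      (fun d p => d.insert p.2 (PySem.List.pySetD (d.getD p.2 []) p.1 '0')) rows0
  let out : PySem.Dict String Int :=
    rows.items.foldl
      (fun d q => d.insert (String.singleton q.1) ((pvIntBase2? q.2).getD 0)) PySem.Dict.empty
  out.items

-- ===== PRECONDITION & SPEC =====
-- Pre_ excludes exactly the inputs where both Pythons raise ValueError: with x empty and the
-- alphabet nonempty, A's int('', 2) — and B's int(b'', 2) — raise.
def Pre_build_Sc_table (x : String) (y : String) : Prop := x = "" → y = ""
instance (x : String) (y : String) : Decidable (Pre_build_Sc_table x y) := by
  unfold Pre_build_Sc_table; infer_instance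
def pvWitness_build_Sc_table : String × String := ("abc", "bd")

def Spec_build_Sc_table (x : String) (y : String) (out : List (String × Int)) : Prop := out = build_Sc_table_alt x y
instance (x : String) (y : String) (out : List (String × Int)) : Decidable (Spec_build_Sc_table x y out) := by unfold Spec_build_Sc_table; infer_instance

-- ===== CLAIM (what is proved, stated in full; the proofs are below) =====
def Claim_equal_build_Sc_table : Prop := ∀ (x : String) (y : String), Dom_build_Sc_table x y → Pre_build_Sc_table x y → Spec_build_Sc_table x y (build_Sc_table x y)

-- ===== LEMMAS AND PROOFS =====

theorem pv_singleton_injective : Function.Injective String.singleton := fun a b h => by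
  simpa using congrArg String.toList h

-- folding fresh, pairwise-distinct keys into a dict appends the pairs in order
theorem pv_items_foldl_insert {α κ ν : Type} [BEq κ] [LawfulBEq κ] (f : α → κ) (g : α → ν) :
    ∀ (cs : List α) (d : PySem.Dict κ ν),
    (cs.map f).Nodup →
    (∀ c ∈ cs, d.contains (f c) = false) →
    (cs.foldl (fun d c => d.insert (f c) (g c)) d).items
      = d.items ++ cs.map (fun c => (f c, g c)) := by
  intro cs
  induction cs with
  | nil => intro d _ _; simp
  | cons c t ih =>
    intro d hnd hfresh
    simp only [List.foldl_cons, List.map_cons]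
    rw [ih _ (by simpa using hnd.of_cons)
        (by
          intro c' hc'
          rw [PySem.Dict.contains_insert]
          have h1 : (f c' == f c) = false := by
            simp only [List.map_cons, List.nodup_cons] at hnd
            have : f c' ≠ f c := by
              intro h; exact hnd.1 (h ▸ List.mem_map_of_mem hc')
            simpa using this
          rw [h1, hfresh c' (List.mem_cons_of_mem _ hc')]
          rfl)]
    rw [PySem.Dict.items_insert_of_not_contains _ _ (hfresh c List.mem_cons_self)]
    simp

-- the clearing pass over enumerate x, read off per key of a dict whose items are known
theorem pv_rows_update (ks : List Char) (hnd : ks.Nodup) :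
    ∀ (ps : List (Int × Char)) (G : Char → List Char) (d : PySem.Dict Char (List Char)),
    d.items = ks.map (fun c => (c, G c)) →
    (∀ p ∈ ps, p.2 ∈ ks) →
    (ps.foldl (fun d p => d.insert p.2 (PySem.List.pySetD (d.getD p.2 []) p.1 '0')) d).items
      = ks.map (fun c => (c,
          ps.foldl (fun row p => if p.2 = c then PySem.List.pySetD row p.1 '0' else row) (G c))) := by
  intro ps
  induction ps with
  | nil => intro G d hd _; simpa using hd
  | cons p t ih =>
    intro G d hd hmem
    have hpk : p.2 ∈ ks := hmem p List.mem_cons_self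
    have hkeys : d.keys = ks := by
      show (List.map (fun x => x.1) d.items) = ks
      rw [hd, List.map_map]
      exact List.map_id ks
    have hget : d.getD p.2 [] = G p.2 := by
      have hm : (p.2, G p.2) ∈ d.items := by
        rw [hd]; exact List.mem_map_of_mem hpk
      have hn : d.keys.Nodup := by rw [hkeys]; exact hnd
      have := PySem.Dict.get?_of_mem_items d hm hn
      simp [PySem.Dict.getD, this]
    have hcont : d.contains p.2 = true :=
      (PySem.Dict.contains_iff_mem_keys d p.2).2 (by rw [hkeys]; exact hpk)
    rw [List.foldl_cons]
    rw [ih (fun c => if c = p.2 then PySem.List.pySetD (G p.2) p.1 '0' else G c) _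
        (by
          rw [PySem.Dict.items_insert_of_contains d _ hcont, hd, List.map_map]
          apply List.map_congr_left
          intro a _
          by_cases hap : a = p.2
          · subst hap; simp [hget]
          · simp [hap])
        (fun q hq => hmem q (List.mem_cons_of_mem _ hq))]
    apply List.map_congr_left
    intro a _
    simp only [List.foldl_cons]
    by_cases hap : a = p.2
    · subst hap; simp
    · have h2 : ¬ p.2 = a := fun h => hap h.symm
      simp [hap, h2]

-- the conditional clearing fold turns an all-ones row into A's per-character binary row
theorem pv_row_final (c : Char) :
    ∀ (l : List Char) (pre : List Char),
    (PySem.List.enumerate l ((pre.length : Nat) : Int)).foldl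
        (fun row p => if p.2 = c then PySem.List.pySetD row p.1 '0' else row)
        (pre ++ List.replicate l.length '1')
      = pre ++ l.map (fun ch => if ch = c then '0' else '1') := by
  intro l
  induction l with
  | nil => intro pre; simp [PySem.List.enumerate]
  | cons ch t ih =>
    intro pre
    simp only [PySem.List.enumerate_cons, List.foldl_cons]
    have hstep : (if (((pre.length : Nat) : Int), ch).2 = c
          then PySem.List.pySetD (pre ++ List.replicate (ch :: t).length '1') (((pre.length : Nat) : Int), ch).1 '0'
          else pre ++ List.replicate (ch :: t).length '1')
        = (pre ++ [if ch = c then '0' else '1']) ++ List.replicate t.length '1' := by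
      by_cases hch : ch = c
      · simp [hch, List.length_cons, List.replicate_succ, List.set_cons_zero]
      · simp only [if_neg hch, List.length_cons, List.replicate_succ]
        simp
    rw [hstep]
    have hlen : ((pre.length : Nat) : Int) + 1 = (((pre ++ [if ch = c then '0' else '1']).length : Nat) : Int) := by
      simp only [List.length_append, List.length_singleton]
      push_cast
      ring
    rw [hlen, ih (pre ++ [if ch = c then '0' else '1'])]
    simp

-- ===== VERDICT (by name: the statement is the Claim_ definition above) =====
theorem build_Sc_table_spec : Claim_equal_build_Sc_table := by
  intro x y _ hpre
  unfold Spec_build_Sc_table build_Sc_table build_Sc_table_alt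
  by_cases hx : x = ""
  · have hy := hpre hx
    subst hx; subst hy
    rfl
  · have hlx : x.toList ≠ [] := by
      intro h
      apply hx
      have h2 := congrArg String.ofList h
      simpa using h2
    simp only [← PySem.List.dedup_eq_ofList]
    set S : List Char := PySem.List.dedup (x.toList ++ y.toList) with hS
    have hSnodup : S.Nodup := by
      rw [hS, PySem.List.dedup_eq_ofList]; exact PySem.Set.nodup_ofList _
    -- A's loop body: the binary string is a map over x; it is nonempty, so the parse succeeds
    have hbody : (fun (Sc : PySem.Dict String Int) (c : Char) =>
        match pvIntBase2? (x.toList.foldl (fun bs char => bs ++ [if char = c then '0' else '1']) []) with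
        | some v => Sc.insert (String.singleton c) v
        | none => Sc)
        = (fun (Sc : PySem.Dict String Int) (c : Char) =>
            Sc.insert (String.singleton c)
              ((x.toList.map (fun ch => if ch = c then '0' else '1')).foldl
                (fun a ch => a * 2 + (if ch = '0' then 0 else 1)) 0)) := by
      funext Sc c
      rw [PySem.List.foldl_append_singleton_eq_map]
      have hne : x.toList.map (fun char => if char = c then '0' else '1') ≠ [] := by
        simpa using hlx
      simp only [List.nil_append, pvIntBase2?, if_neg hne]
    rw [hbody]
    rw [pv_items_foldl_insert String.singleton _ S PySem.Dict.empty
        (hSnodup.map pv_singleton_injective)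
        (fun c _ => PySem.Dict.contains_empty _)]
    -- B's rows after initialisation
    have hrows0 : (S.foldl (fun d c => d.insert c (List.replicate x.toList.length '1'))
          PySem.Dict.empty).items
        = S.map (fun c => (c, List.replicate x.toList.length '1')) := by
      rw [pv_items_foldl_insert (fun c => c) _ S PySem.Dict.empty
          (by simpa using hSnodup)
          (fun c _ => PySem.Dict.contains_empty _)]
      simp [show (PySem.Dict.empty : PySem.Dict Char (List Char)).items = [] from rfl]
    -- B's rows after the clearing pass: each key's row is A's binary row
    have hrow : ∀ c : Char,
        (PySem.List.enumerate x.toList).foldl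
          (fun row p => if p.2 = c then PySem.List.pySetD row p.1 '0' else row)
          (List.replicate x.toList.length '1')
        = x.toList.map (fun ch => if ch = c then '0' else '1') := by
      intro c
      have := pv_row_final c x.toList []
      simpa using this
    have hrows : ((PySem.List.enumerate x.toList).foldl
          (fun d p => d.insert p.2 (PySem.List.pySetD (d.getD p.2 []) p.1 '0'))
          (S.foldl (fun d c => d.insert c (List.replicate x.toList.length '1')) PySem.Dict.empty)).items
        = S.map (fun c => (c, x.toList.map (fun ch => if ch = c then '0' else '1'))) := by
      rw [pv_rows_update S hSnodup (PySem.List.enumerate x.toList)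
          (fun _ => List.replicate x.toList.length '1') _ hrows0
          (by
            intro p hp
            rw [hS, PySem.List.dedup_eq_ofList, PySem.Set.mem_ofList]
            apply List.mem_append_left
            have := List.mem_map_of_mem (f := fun q : Int × Char => q.2) hp
            rw [PySem.List.map_snd_enumerate] at this
            exact this)]
      apply List.map_congr_left
      intro c _
      rw [hrow c]
    rw [hrows]
    rw [pv_items_foldl_insert (fun q : Char × List Char => String.singleton q.1)
        (fun q => (pvIntBase2? q.2).getD 0) _ PySem.Dict.empty
        (by
          simp only [List.map_map]
          have : ((fun q : Char × List Char => String.singleton q.1) ∘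
              (fun c => (c, x.toList.map (fun ch => if ch = c then '0' else '1'))))
              = fun c => String.singleton c := rfl
          rw [this]
          exact hSnodup.map pv_singleton_injective)
        (fun q _ => PySem.Dict.contains_empty _)]
    simp only [show (PySem.Dict.empty : PySem.Dict String Int).items = [] from rfl,
      List.nil_append, List.map_map]
    apply List.map_congr_left
    intro c _
    have hne : x.toList.map (fun ch => if ch = c then '0' else '1') ≠ [] := by
      simpa using hlx
    simp only [Function.comp, pvIntBase2?, if_neg hne, Option.getD_some]
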